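-- pv_equiv track=rewrite | github.com/miliar/Code_Jam_Webscraper | solutions_python/Problem_126/468.py | check
-- ===== SOURCE A (Python) =====
-- vowel = ['a','e','i','o','u']
--
-- def check(word,n):
--
-- #    print word
--
--     length = len(word)
--
--
--
--
--     for i in range(length-n+1):
--
--         sub = word[i:i+n]
--
--         if hasvowel(sub):
--             pass
--         else:
--             return True
--     return False
--
-- def hasvowel(word):
--     for v in vowel:
--         if word.find(v)<0:
--             continue
--         else:
--             return True
--     return False
-- ===== SOURCE B (Python) =====
-- def check(word, n):
--     # one pass: track the length of the current all-consonant run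
--     if n <= 0:
--         return True
--     run = 0
--     for c in word:
--         run = 0 if c in 'aeiou' else run + 1
--         if run >= n:
--             return True
--     return False
-- ===== Notes on version B (the rewrite author's own statement) =====
-- stated objective: faster
-- what changed: Replaces A's scan over all length-n windows with a per-window vowel search by a single left-to-right pass that tracks the current consonant-run length and reports success when it reaches n.
import Mathlib
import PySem

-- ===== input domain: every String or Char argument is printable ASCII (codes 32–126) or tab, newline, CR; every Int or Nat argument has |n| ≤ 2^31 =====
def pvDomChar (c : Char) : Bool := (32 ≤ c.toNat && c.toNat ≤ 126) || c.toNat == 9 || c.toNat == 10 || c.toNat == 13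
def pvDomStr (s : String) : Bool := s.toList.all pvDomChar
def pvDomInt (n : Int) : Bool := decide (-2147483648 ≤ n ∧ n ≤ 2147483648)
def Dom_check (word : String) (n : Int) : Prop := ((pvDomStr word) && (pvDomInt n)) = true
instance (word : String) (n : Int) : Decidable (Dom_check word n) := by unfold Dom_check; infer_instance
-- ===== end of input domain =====

-- B replaces A's scan over every length-n window (each searched for each vowel) by a
-- single left-to-right pass tracking the current consonant-run length (objective: faster; one pass instead of a pass per window).

-- ===== PORT A =====
def vowel : List Char := ['a', 'e', 'i', 'o', 'u']

def hasvowel (word : String) : Bool :=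
  vowel.any (fun v => !(decide (PySem.Str.find word (String.ofList [v]) < 0)))

def check (word : String) (n : Int) : Bool :=
  let length : Int := PySem.Str.len word
  (PySem.List.pyRange 0 (length - n + 1) 1).any (fun i =>
    let sub := PySem.Str.slice word (some i) (some (i + n))
    !(hasvowel sub))

-- ===== PORT B =====
def checkAltLoop (n : Int) (run : Int) : List Char → Bool
  | [] => false
  | c :: cs =>
      let run' := if c ∈ "aeiou".toList then 0 else run + 1
      if n ≤ run' then true else checkAltLoop n run' cs

def check_alt (word : String) (n : Int) : Bool :=
  if n ≤ 0 then true
  else checkAltLoop n 0 word.toList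

-- ===== PRECONDITION & SPEC =====
def Spec_check (word : String) (n : Int) (out : Bool) : Prop := out = check_alt word n
instance (word : String) (n : Int) (out : Bool) : Decidable (Spec_check word n out) := by unfold Spec_check; infer_instance

-- ===== CLAIM (what is proved, stated in full; the proofs are below) =====
def Claim_equal_check : Prop := ∀ (word : String) (n : Int), Dom_check word n → Spec_check word n (check word n)

-- ===== LEMMAS AND PROOFS =====

-- consonant flag of a character
def consB (c : Char) : Bool := !(vowel.contains c)

-- "the Bool mask bs contains a window of nn consecutive trues"
def winM (nn : Nat) (bs : List Bool) : Prop :=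
  ∃ i : Nat, i + nn ≤ bs.length ∧ ((bs.drop i).take nn).all id = true

theorem hasvowel_eq (s : String) :
    hasvowel s = s.toList.any (fun c => vowel.contains c) := by
  rw [Bool.eq_iff_iff]
  unfold hasvowel
  simp only [List.any_eq_true, Bool.not_eq_true', decide_eq_false_iff_not, not_lt,
    PySem.Str.find_eq, String.toList_ofList, List.contains_iff_mem]
  constructor
  · rintro ⟨v, hv, hfind⟩
    have hne : PySem.Chars.find s.toList [v] ≠ -1 := by omega
    rw [ne_eq, PySem.Chars.find_eq_neg_one_iff, not_not, List.singleton_infix_iff] at hne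
    exact ⟨v, hne, hv⟩
  · rintro ⟨c, hc, hcv⟩
    refine ⟨c, hcv, ?_⟩
    have h1 := PySem.Chars.neg_one_le_find s.toList [c]
    have hne : PySem.Chars.find s.toList [c] ≠ -1 := by
      rw [ne_eq, PySem.Chars.find_eq_neg_one_iff, not_not, List.singleton_infix_iff]
      exact hc
    omega

theorem sub_all_iff (word : String) (n i : Int) (h0 : 0 ≤ i) (hn : 0 ≤ n) :
    (!(hasvowel (PySem.Str.slice word (some i) (some (i + n))))) = true ↔
    ((word.toList.drop i.toNat).take n.toNat).all consB = true := by
  rw [Bool.not_eq_eq_eq_not, Bool.not_true, hasvowel_eq, PySem.Str.toList_slice,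
    PySem.Chars.slice_eq_listSlice, PySem.List.slice_toNat _ h0 (by omega)]
  have : (i + n).toNat - i.toNat = n.toNat := by omega
  rw [this]
  simp only [List.any_eq_false, List.all_eq_true, consB, Bool.not_eq_eq_eq_not,
    Bool.not_true]
  exact ⟨fun h x hx => by simpa using h x hx, fun h x hx => by simpa using h x hx⟩

theorem check_true_iff (word : String) (n : Int) (hn : 0 < n) :
    check word n = true ↔ winM n.toNat (word.toList.map consB) := by
  unfold check winM
  simp only [PySem.Str.len_eq, List.any_eq_true, PySem.List.mem_pyRange_one]
  constructor
  · rintro ⟨i, ⟨h0, hlt⟩, hf⟩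
    refine ⟨i.toNat, by rw [List.length_map]; omega, ?_⟩
    rw [sub_all_iff word n i h0 (by omega)] at hf
    rw [← List.map_drop, ← List.map_take, List.all_map]
    simpa using hf
  · rintro ⟨k, hk, hall⟩
    simp only [List.length_map] at hk
    refine ⟨(k : Int), ⟨by omega, by omega⟩, ?_⟩
    rw [sub_all_iff word n (k : Int) (by omega) (by omega)]
    simp only [Int.toNat_natCast]
    rw [← List.map_drop, ← List.map_take, List.all_map] at hall
    simpa using hall

theorem winM_skip_false (nn : Nat) (xs ys : List Bool) (h : xs.length < nn) :
    winM nn (xs ++ false :: ys) ↔ winM nn ys := by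
  have hL : xs ++ false :: ys = (xs ++ [false]) ++ ys := by simp
  constructor
  · rintro ⟨i, hlen, hall⟩
    simp only [List.length_append, List.length_cons] at hlen
    have hi : xs.length + 1 ≤ i := by
      by_contra hcon
      push Not at hcon
      have hget : ((xs ++ false :: ys).drop i)[xs.length - i]? = some false := by
        rw [List.getElem?_drop]
        have : i + (xs.length - i) = xs.length := by omega
        rw [this]
        simp
      have hmem : false ∈ ((xs ++ false :: ys).drop i).take nn := by
        have : (((xs ++ false :: ys).drop i).take nn)[xs.length - i]? = some false := by
          rw [List.getElem?_take_of_lt (by omega)]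
          exact hget
        exact List.mem_of_getElem? this
      have := (List.all_eq_true.mp hall) false hmem
      simp at this
    refine ⟨i - (xs.length + 1), by omega, ?_⟩
    have hdrop : (xs ++ false :: ys).drop i = ys.drop (i - (xs.length + 1)) := by
      rw [hL, List.drop_append]
      have h1 : (xs ++ [false]).drop i = [] := by
        apply List.drop_eq_nil_of_le; simp; omega
      rw [h1]
      simp
    rwa [hdrop] at hall
  · rintro ⟨i, hlen, hall⟩
    refine ⟨xs.length + 1 + i, by simp; omega, ?_⟩
    have hdrop : (xs ++ false :: ys).drop (xs.length + 1 + i) = ys.drop i := by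
      rw [hL]
      have : xs.length + 1 + i = (xs ++ [false]).length + i := by simp
      rw [this, List.drop_length_add_append]
    rwa [hdrop]

theorem aeiou_toList : "aeiou".toList = vowel := by decide

theorem checkAltLoop_true_iff (n : Int) (hn : 0 < n) :
    ∀ (l : List Char) (run : Nat), (run : Int) < n →
    (checkAltLoop n (run : Int) l = true ↔
      winM n.toNat (List.replicate run true ++ l.map consB)) := by
  intro l
  induction l with
  | nil =>
    intro run hrun
    simp only [checkAltLoop, List.map_nil, List.append_nil]
    constructor
    · intro h; cases h
    · rintro ⟨i, hlen, -⟩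
      rw [List.length_replicate] at hlen
      omega
  | cons c cs ih =>
    intro run hrun
    have hnn : run < n.toNat := by omega
    by_cases hc : c ∈ "aeiou".toList
    · have hcb : consB c = false := by
        rw [aeiou_toList] at hc
        simp [consB, hc]
      simp only [checkAltLoop, hc, if_true, if_neg (by omega : ¬ n ≤ (0:Int))]
      have h0 := ih 0 (by omega)
      simp only [Nat.cast_zero, List.replicate_zero, List.nil_append] at h0
      rw [h0, List.map_cons, hcb,
        winM_skip_false n.toNat (List.replicate run true) (cs.map consB) (by simp; omega)]
    · have hcb : consB c = true := by
        rw [aeiou_toList] at hc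
        simp [consB, hc]
      simp only [checkAltLoop, hc, if_false, List.map_cons, hcb]
      by_cases hle : n ≤ (run : Int) + 1
      · rw [if_pos hle]
        have hrn : n.toNat = run + 1 := by omega
        constructor
        · intro _
          refine ⟨0, ?_, ?_⟩
          · simp; omega
          · rw [List.drop_zero, hrn, List.take_append]
            simp [List.take_of_length_le]
        · intro _; rfl
      · rw [if_neg hle]
        have h1 := ih (run + 1) (by push_cast; omega)
        push_cast at h1
        rw [h1, List.replicate_succ', List.append_assoc, List.singleton_append]

theorem check_le_zero (word : String) (n : Int) (hn : n ≤ 0) : check word n = true := by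
  unfold check
  simp only [PySem.Str.len_eq, List.any_eq_true, PySem.List.mem_pyRange_one]
  have hl : (0:Int) ≤ (word.toList.length : Int) := by positivity
  refine ⟨(word.toList.length : Int) - n, ⟨by omega, by omega⟩, ?_⟩
  rw [Bool.not_eq_eq_eq_not, Bool.not_true, hasvowel_eq, PySem.Str.toList_slice,
    PySem.Chars.slice_eq_listSlice,
    PySem.List.slice_toNat _ (by omega) (by omega)]
  rw [List.drop_eq_nil_of_le (by omega)]
  simp

-- ===== VERDICT (by name: the statement is the Claim_ definition above) =====
theorem check_spec : Claim_equal_check := by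
  intro word n _
  unfold Spec_check
  by_cases hn : n ≤ 0
  · rw [check_le_zero word n hn, check_alt, if_pos hn]
  · push Not at hn
    rw [check_alt, if_neg (by omega)]
    rw [Bool.eq_iff_iff, check_true_iff word n hn]
    have := checkAltLoop_true_iff n hn word.toList 0 (by omega)
    simpa using this.symm
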